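-- pv_equiv track=rewrite | github.com/davast/battleship_validator | validation.py | counter_2_to_4
-- ===== SOURCE A (Python) =====
-- from itertools import groupby
--
-- def counter_2_to_4(data: list) -> dict:
--     map = {(1, 2):0,
--             (1, 3):0,
--             (1, 4):0,
--     }
--     for line in data:
--         grouped = [(k, sum(1 for i in g)) for k,g in groupby(line)]
--         for item in grouped:
--             if item in map:
--                 map[item] += 1
--     return map
-- ===== SOURCE B (Python) =====
-- def counter_2_to_4(data: list) -> dict:
--     result = {}
--     for length in (2, 3, 4):
--         total = 0
--         for line in data:
--             n = len(line)
--             for i in range(n):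
--                 if (line[i] == 1
--                         and (i == 0 or line[i - 1] != 1)
--                         and i + length <= n
--                         and all(line[i + j] == 1 for j in range(length))
--                         and (i + length == n or line[i + length] != 1)):
--                     total += 1
--         result[(1, length)] = total
--     return result
-- ===== Notes on version B (the rewrite author's own statement) =====
-- stated objective: alternative
-- what changed: Instead of run-length-encoding each line (groupby) and rescanning the materialized group list against the dict, B iterates over the three target lengths and, for each, counts index positions i that start a maximal run of exactly that many 1s via a boundary predicate (line[i-1]!=1, window all 1s, line[i+L]!=1) - a positional window scan with no run-length state.
import Mathlib
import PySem

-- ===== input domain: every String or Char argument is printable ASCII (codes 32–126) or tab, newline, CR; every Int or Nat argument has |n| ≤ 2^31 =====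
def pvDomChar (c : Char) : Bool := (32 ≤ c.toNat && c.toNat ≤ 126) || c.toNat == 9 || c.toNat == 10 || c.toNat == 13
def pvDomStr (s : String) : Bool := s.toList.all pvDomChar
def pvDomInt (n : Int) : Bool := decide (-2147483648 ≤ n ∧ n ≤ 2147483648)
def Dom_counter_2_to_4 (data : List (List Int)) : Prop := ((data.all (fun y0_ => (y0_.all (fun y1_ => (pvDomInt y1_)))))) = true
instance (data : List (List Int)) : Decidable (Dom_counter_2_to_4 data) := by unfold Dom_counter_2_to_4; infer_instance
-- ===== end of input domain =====

-- B replaces A's groupby run-length encoding + group-list rescan by, for each target length,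
-- counting the index positions that start a maximal run of exactly that many 1s
-- (alternative algorithm; a timing run measured it faster by a constant factor).


-- ===== PORT A =====
-- hand port of itertools.groupby consumption: [(k, sum(1 for i in g)) for k, g in groupby(line)]
def pvGroupAux (k : Int) (n : Int) : List Int → List (Int × Int)
  | [] => [(k, n)]
  | x :: xs => if x = k then pvGroupAux k (n + 1) xs else (k, n) :: pvGroupAux x 1 xs

def pvGrouped : List Int → List (Int × Int)
  | [] => []
  | x :: xs => pvGroupAux x 1 xs

def counter_2_to_4 (data : List (List Int)) : List (Int × Int × Int) :=
  let init : PySem.Dict (Int × Int) Int :=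
    PySem.Dict.mk [((1, 2), 0), ((1, 3), 0), ((1, 4), 0)]
  let m := data.foldl (fun m line =>
    (pvGrouped line).foldl (fun m item =>
      if m.contains item then m.modify item 0 (· + 1) else m) m) init
  m.items.map (fun p => (p.1.1, p.1.2, p.2))

-- ===== PORT B =====
-- the condition tested by Source B's inner if: position i starts a maximal run of exactly L ones.
-- List.getD is exact here: Python's and/or short-circuiting guarantees every index it actually
-- evaluates is in range, and each out-of-range getD sits in a conjunct/disjunct whose value is
-- already forced by an earlier in-range test, so the Bool value agrees with Python's.
def pvHit (line : List Int) (n : Nat) (L : Nat) (i : Nat) : Bool :=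
  line.getD i 0 == 1 &&
  (i == 0 || line.getD (i - 1) 0 != 1) &&
  decide (i + L ≤ n) &&
  (List.range L).all (fun j => line.getD (i + j) 0 == 1) &&
  ((i + L == n) || line.getD (i + L) 0 != 1)

-- Source B: for length in (2,3,4): total = 0; for line: for i in range(n): if <hit>: total += 1
def counter_2_to_4_alt (data : List (List Int)) : List (Int × Int × Int) :=
  ([2, 3, 4] : List Nat).map (fun (L : Nat) =>
    ((1 : Int), (L : Int),
      data.foldl (fun t line =>
        (List.range line.length).foldl
          (fun t i => if pvHit line line.length L i then t + 1 else t) t) 0))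

-- ===== PRECONDITION & SPEC =====
def Spec_counter_2_to_4 (data : List (List Int)) (out : List (Int × Int × Int)) : Prop := out = counter_2_to_4_alt data
instance (data : List (List Int)) (out : List (Int × Int × Int)) : Decidable (Spec_counter_2_to_4 data out) := by unfold Spec_counter_2_to_4; infer_instance

-- ===== CLAIM (what is proved, stated in full; the proofs are below) =====
def Claim_equal_counter_2_to_4 : Prop := ∀ (data : List (List Int)), Dom_counter_2_to_4 data → Spec_counter_2_to_4 data (counter_2_to_4 data)

-- ===== LEMMAS AND PROOFS =====

-- the triple (c2,c3,c4) rendered as A's dict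
def pvDictOf (c : Int × Int × Int) : PySem.Dict (Int × Int) Int :=
  PySem.Dict.mk [((1, 2), c.1), ((1, 3), c.2.1), ((1, 4), c.2.2)]

def pvStepA (m : PySem.Dict (Int × Int) Int) (item : Int × Int) : PySem.Dict (Int × Int) Int :=
  if m.contains item then m.modify item 0 (· + 1) else m

-- A's dict update at triple level
def pvBumpRun (c : Int × Int × Int) (item : Int × Int) : Int × Int × Int :=
  if item.1 = 1 ∧ 2 ≤ item.2 ∧ item.2 ≤ 4 then
    (if item.2 = 2 then (c.1 + 1, c.2.1, c.2.2)
     else if item.2 = 3 then (c.1, c.2.1 + 1, c.2.2)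
     else (c.1, c.2.1, c.2.2 + 1))
  else c

theorem pvStepA_dictOf (c : Int × Int × Int) (item : Int × Int) :
    pvStepA (pvDictOf c) item = pvDictOf (pvBumpRun c item) := by
  obtain ⟨k, n⟩ := item
  obtain ⟨a, b, d⟩ := c
  simp only [pvStepA, pvDictOf, pvBumpRun, PySem.Dict.contains, PySem.Dict.modify]
  by_cases hk : k = 1
  · subst hk
    by_cases h2 : n = 2
    · subst h2
      simp [PySem.Dict.insert, PySem.Dict.getD, PySem.Dict.get?, PySem.Dict.contains]
    · by_cases h3 : n = 3
      · subst h3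
        simp [PySem.Dict.insert, PySem.Dict.getD, PySem.Dict.get?, PySem.Dict.contains]
      · by_cases h4 : n = 4
        · subst h4
          simp [PySem.Dict.insert, PySem.Dict.getD, PySem.Dict.get?, PySem.Dict.contains]
        · have hno : ¬ (2 ≤ n ∧ n ≤ 4) := by omega
          simp [Prod.ext_iff, hno]
          omega
  · simp [Prod.ext_iff, hk]
    rintro (⟨h1, _⟩ | ⟨h1, _⟩ | ⟨h1, _⟩) <;> exact absurd h1.symm hk

theorem foldA_dictOf (rs : List (Int × Int)) (c : Int × Int × Int) :
    rs.foldl pvStepA (pvDictOf c) = pvDictOf (rs.foldl pvBumpRun c) := by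
  induction rs generalizing c with
  | nil => rfl
  | cons r rs ih => simp [List.foldl, pvStepA_dictOf, ih]

-- generalized hit predicate: 'left' is the element just before index 0 (none = line start)
def pvHitL (left : Option Int) (line : List Int) (L : Nat) (i : Nat) : Bool :=
  line.getD i 0 == 1 &&
  (match i with
   | 0 => match left with | none => true | some a => a != 1
   | Nat.succ j => line.getD j 0 != 1) &&
  decide (i + L ≤ line.length) &&
  (List.range L).all (fun j => line.getD (i + j) 0 == 1) &&
  ((i + L == line.length) || line.getD (i + L) 0 != 1)

theorem pvHit_eq_hitL (line : List Int) (L i : Nat) :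
    pvHit line line.length L i = pvHitL none line L i := by
  cases i <;> simp [pvHit, pvHitL]

def pvCW (left : Option Int) (line : List Int) (L : Nat) : Nat :=
  (List.range line.length).countP (pvHitL left line L)

-- spec count: number of maximal runs of 1s of length exactly L
def pvS (L : Nat) : List Int → Nat
  | [] => 0
  | x :: xs =>
    if x = 1 then
      (if (xs.takeWhile (· == 1)).length + 1 = L then 1 else 0) + pvS L (xs.dropWhile (· == 1))
    else pvS L xs
termination_by l => l.length
decreasing_by
  · have := List.length_dropWhile_le (fun y => y == (1:Int)) xs
    simp only [List.length_cons]; omega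
  · simp only [List.length_cons]; omega

theorem pvHitL_shift (left : Option Int) (x : Int) (xs : List Int) (L i : Nat) :
    pvHitL left (x :: xs) L (i + 1) = pvHitL (some x) xs L i := by
  have h1 : ∀ j : Nat, i + 1 + j = (i + j) + 1 := by omega
  have e1 : decide (i + L + 1 ≤ xs.length + 1) = decide (i + L ≤ xs.length) :=
    decide_eq_decide.mpr (by omega)
  have e2 : ((i + L + 1 == xs.length + 1) : Bool) = (i + L == xs.length) := by
    rw [beq_eq_decide, beq_eq_decide]; exact decide_eq_decide.mpr (by omega)
  cases i with
  | zero =>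
    simp only [pvHitL, h1, List.getD_cons_succ, List.getD_cons_zero, List.length_cons] at *
    rw [e1, e2]
  | succ j =>
    simp only [pvHitL, h1, List.getD_cons_succ, List.length_cons] at *
    rw [e1, e2]
theorem pvCW_cons (left : Option Int) (x : Int) (xs : List Int) (L : Nat) :
    pvCW left (x :: xs) L =
      (if pvHitL left (x :: xs) L 0 then 1 else 0) + pvCW (some x) xs L := by
  simp only [pvCW, List.length_cons, List.range_succ_eq_map, List.countP_cons, List.countP_map]
  have : (pvHitL left (x :: xs) L ∘ Nat.succ) = pvHitL (some x) xs L := by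
    funext j; exact pvHitL_shift left x xs L j
  rw [this]
  omega
theorem pvTwin : ∀ (line : List Int) (L : Nat),
    (decide (L ≤ line.length) &&
     (List.range L).all (fun j => line.getD j 0 == 1) &&
     ((L == line.length) || line.getD L 0 != 1)) =
    ((line.takeWhile (· == 1)).length == L) := by
  intro line
  induction line with
  | nil =>
    intro L
    cases L with
    | zero => decide
    | succ M => simp
  | cons x xs ih =>
    intro L
    by_cases hx : x = 1
    · subst hx
      cases L with
      | zero => simp [List.takeWhile_cons]
      | succ M =>
        have hr : (List.range (M + 1)).all (fun j => (1 :: xs).getD j 0 == 1) =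
            (List.range M).all (fun j => xs.getD j 0 == 1) := by
          rw [List.range_succ_eq_map]
          simp [List.all_map, Function.comp_def]
        have e1 : decide (M + 1 ≤ (1 :: xs).length) = decide (M ≤ xs.length) :=
          decide_eq_decide.mpr (by simp)
        have e2 : ((M + 1 == (1 :: xs).length) : Bool) = (M == xs.length) := by
          rw [beq_eq_decide, beq_eq_decide]; exact decide_eq_decide.mpr (by simp)
        have e3 : (((1 : Int) :: xs).takeWhile (· == 1)).length = (xs.takeWhile (· == 1)).length + 1 := by
          simp [List.takeWhile_cons]
        rw [hr, e1, e2, List.getD_cons_succ, ih M, e3]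
        rw [beq_eq_decide, beq_eq_decide]; exact decide_eq_decide.mpr (by omega)
    · have hx' : (x == (1:Int)) = false := by simp [hx]
      cases L with
      | zero =>
        simp [List.takeWhile_cons, hx', List.getD_cons_zero, hx]
      | succ M =>
        have hall : (List.range (M + 1)).all (fun j => (x :: xs).getD j 0 == 1) = false := by
          apply List.all_eq_false.mpr
          exact ⟨0, by simp [List.mem_range], by simp [hx]⟩
        rw [hall]
        simp [List.takeWhile_cons, hx']
theorem pvCW_eq_S : ∀ (line : List Int) (L : Nat) (left : Option Int),
    pvCW left line L =
      if left == some 1 then pvS L (line.dropWhile (· == 1)) else pvS L line := by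
  intro line
  induction line with
  | nil => intro L left; simp [pvCW, pvS]
  | cons x xs ih =>
    intro L left
    rw [pvCW_cons]
    by_cases hx : x = 1
    · subst hx
      by_cases hl : left == some 1
      · -- left is 1: position 0 is not a run start
        have h0 : pvHitL left (1 :: xs) L 0 = false := by
          cases left with
          | none => simp at hl
          | some a =>
            have : a = 1 := by simpa using hl
            subst this
            simp [pvHitL]
        rw [h0, ih L (some 1), if_pos hl]
        simp [pvS, List.dropWhile_cons]
      · -- left is not 1: position 0 starts the leading run of ones
        have h0 : pvHitL left (1 :: xs) L 0 =
            (((1 :: xs).takeWhile (· == (1:Int))).length == L) := by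
          rw [← pvTwin (1 :: xs) L]
          cases left with
          | none => simp [pvHitL]; rfl
          | some a =>
            have ha : (a != 1) = true := by
              simp only [bne_iff_ne, ne_eq]
              intro h; subst h; simp at hl
            simp [pvHitL, ha]; rfl
        rw [h0, ih L (some 1), if_neg hl]
        simp only [if_pos (by rfl : ((some (1:Int) == some 1) = true))]
        have e3 : (((1 : Int) :: xs).takeWhile (· == 1)).length = (xs.takeWhile (· == 1)).length + 1 := by
          simp [List.takeWhile_cons]
        rw [e3]
        simp only [pvS, if_pos rfl]
        by_cases hL : (xs.takeWhile (· == (1:Int))).length + 1 = L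
        · simp [hL]
        · simp [hL, beq_eq_decide, hL]
    · -- x ≠ 1
      have h0 : pvHitL left (x :: xs) L 0 = false := by
        simp [pvHitL, hx]
      have hxb : ((x == (1:Int))) = false := by simp [hx]
      rw [h0, ih L (some x)]
      have : ((some x == some (1:Int))) = false := by simp [hx]
      rw [this]
      simp only [Bool.false_eq_true, if_false, List.dropWhile_cons, hxb]
      cases hls : (left == some (1:Int)) <;> simp [pvS, hx, hls]
theorem pvS_dropWhile_ne (L : Nat) (x : Int) (hx : x ≠ 1) :
    ∀ (xs : List Int), pvS L (xs.dropWhile (· == x)) = pvS L xs := by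
  intro xs
  induction xs with
  | nil => simp
  | cons y ys ih =>
    by_cases hy : y = x
    · subst hy
      rw [List.dropWhile_cons, if_pos (by simp)]
      rw [ih]
      simp [pvS, hx]
    · rw [List.dropWhile_cons, if_neg (by simp [hy])]

theorem pvGroupAux_eq : ∀ (xs : List Int) (k : Int) (n : Int),
    pvGroupAux k n xs =
      (k, n + ((xs.takeWhile (· == k)).length : Int)) :: pvGrouped (xs.dropWhile (· == k)) := by
  intro xs
  induction xs with
  | nil => intro k n; simp [pvGroupAux, pvGrouped]
  | cons x xs ih =>
    intro k n
    by_cases hx : x = k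
    · subst hx
      rw [show pvGroupAux x n (x :: xs) = pvGroupAux x (n + 1) xs from by simp [pvGroupAux]]
      rw [ih x (n + 1)]
      rw [List.takeWhile_cons, if_pos (by simp), List.dropWhile_cons, if_pos (by simp)]
      simp only [List.length_cons]
      congr 1
      push_cast
      ring_nf
    · rw [show pvGroupAux k n (x :: xs) = (k, n) :: pvGroupAux x 1 xs from by simp [pvGroupAux, hx]]
      rw [List.takeWhile_cons, if_neg (by simp [hx]), List.dropWhile_cons, if_neg (by simp [hx])]
      simp [pvGrouped]
theorem pvGC_eq_S (L : Nat) : ∀ (fuel : Nat) (line : List Int), line.length ≤ fuel →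
    (pvGrouped line).countP (fun p => p == ((1 : Int), (L : Int))) = pvS L line := by
  intro fuel
  induction fuel with
  | zero =>
    intro line h
    have : line = [] := by cases line <;> simp_all
    subst this; simp [pvGrouped, pvS]
  | succ f ih =>
    intro line h
    cases line with
    | nil => simp [pvGrouped, pvS]
    | cons x xs =>
      rw [show pvGrouped (x :: xs) = pvGroupAux x 1 xs from rfl, pvGroupAux_eq]
      rw [List.countP_cons]
      have hdrop : (xs.dropWhile (· == x)).length ≤ f := by
        have := List.length_dropWhile_le (fun y => y == x) xs
        simp only [List.length_cons] at h
        omega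
      by_cases hx : x = 1
      · subst hx
        rw [ih _ hdrop]
        have hS : pvS L ((1:Int) :: xs) =
            (if (xs.takeWhile (· == (1:Int))).length + 1 = L then 1 else 0) +
              pvS L (xs.dropWhile (· == (1:Int))) := by
          simp [pvS]
        rw [hS]
        by_cases hL : (xs.takeWhile (· == (1:Int))).length + 1 = L
        · rw [if_pos (by simp [Prod.ext_iff]; omega), if_pos hL]
          omega
        · rw [if_neg (by simp [Prod.ext_iff]; omega), if_neg hL]
          omega
      · rw [ih _ hdrop, pvS_dropWhile_ne L x hx xs]
        rw [if_neg (by simp [Prod.ext_iff, hx])]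
        simp [pvS, hx]
def pvGCI (L : Nat) (rs : List (Int × Int)) : Int :=
  (rs.countP (fun p => p == ((1 : Int), (L : Int))) : Int)

theorem pvBump_item (c : Int × Int × Int) (p : Int × Int) :
    pvBumpRun c p =
      (c.1 + (if p == ((1:Int),(2:Int)) then 1 else 0),
       c.2.1 + (if p == ((1:Int),(3:Int)) then 1 else 0),
       c.2.2 + (if p == ((1:Int),(4:Int)) then 1 else 0)) := by
  obtain ⟨k, n⟩ := p
  simp only [pvBumpRun, Prod.mk.injEq, beq_iff_eq, Prod.ext_iff]
  by_cases hk : k = 1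
  · subst hk
    by_cases h2 : n = 2
    · subst h2; norm_num
    · by_cases h3 : n = 3
      · subst h3; norm_num
      · by_cases h4 : n = 4
        · subst h4; norm_num
        · have hno : ¬ ((1:Int) = 1 ∧ 2 ≤ n ∧ n ≤ 4) := by omega
          rw [if_neg hno]
          simp [h2, h3, h4]
  · rw [if_neg (by tauto)]
    simp [hk]

theorem pvBump_fold : ∀ (rs : List (Int × Int)) (c : Int × Int × Int),
    rs.foldl pvBumpRun c = (c.1 + pvGCI 2 rs, c.2.1 + pvGCI 3 rs, c.2.2 + pvGCI 4 rs) := by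
  intro rs
  induction rs with
  | nil => intro c; simp [pvGCI]
  | cons p rs ih =>
    intro c
    rw [List.foldl_cons, pvBump_item, ih]
    simp only [pvGCI, List.countP_cons, Prod.ext_iff]
    refine ⟨by push_cast; split_ifs <;> ring, by push_cast; split_ifs <;> ring, by push_cast; split_ifs <;> ring⟩

theorem pvA_fold : ∀ (data : List (List Int)) (c : Int × Int × Int),
    data.foldl (fun c line => (pvGrouped line).foldl pvBumpRun c) c =
      (c.1 + (data.map (fun l => pvGCI 2 (pvGrouped l))).sum,
       c.2.1 + (data.map (fun l => pvGCI 3 (pvGrouped l))).sum,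
       c.2.2 + (data.map (fun l => pvGCI 4 (pvGrouped l))).sum) := by
  intro data
  induction data with
  | nil => intro c; simp
  | cons l rest ih =>
    intro c
    rw [List.foldl_cons, pvBump_fold, ih]
    simp only [List.map_cons, List.sum_cons, Prod.ext_iff]
    refine ⟨by ring, by ring, by ring⟩

theorem pvFoldCount' (p : Nat → Bool) (l : List Nat) (t : Int) :
    l.foldl (fun t i => if p i then t + 1 else t) t = t + (l.countP p : Int) := by
  induction l generalizing t with
  | nil => simp
  | cons a l ih => by_cases h : p a <;> simp [List.foldl, h, ih, List.countP_cons] <;> push_cast <;> ring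

theorem pvLine_count (L : Nat) (line : List Int) (t : Int) :
    (List.range line.length).foldl
        (fun t i => if pvHit line line.length L i then t + 1 else t) t =
      t + pvGCI L (pvGrouped line) := by
  rw [pvFoldCount']
  congr 1
  have h1 : (List.range line.length).countP (pvHit line line.length L) = pvCW none line L := by
    apply List.countP_congr
    intro i _
    rw [pvHit_eq_hitL]
  rw [pvGCI, h1, pvCW_eq_S, pvGC_eq_S L line.length line (le_refl _)]
  simp

theorem pvB_fold (L : Nat) : ∀ (data : List (List Int)) (t : Int),
    data.foldl (fun t line =>
        (List.range line.length).foldl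
          (fun t i => if pvHit line line.length L i then t + 1 else t) t) t =
      t + (data.map (fun l => pvGCI L (pvGrouped l))).sum := by
  intro data
  induction data with
  | nil => intro t; simp
  | cons l rest ih =>
    intro t
    rw [List.foldl_cons, pvLine_count, ih]
    simp [add_assoc]

theorem pvDict_fold (data : List (List Int)) (c : Int × Int × Int) :
    data.foldl (fun m line => (pvGrouped line).foldl pvStepA m) (pvDictOf c)
      = pvDictOf (data.foldl (fun c line => (pvGrouped line).foldl pvBumpRun c) c) := by
  induction data generalizing c with
  | nil => rfl
  | cons l rest ih => simp only [List.foldl, foldA_dictOf, ih]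

-- ===== VERDICT (by name: the statement is the Claim_ definition above) =====
theorem counter_2_to_4_spec : Claim_equal_counter_2_to_4 := by
  intro data _
  show counter_2_to_4 data = counter_2_to_4_alt data
  simp only [counter_2_to_4, counter_2_to_4_alt]
  have e : (fun (m : PySem.Dict (Int × Int) Int) (item : Int × Int) =>
      if m.contains item then m.modify item 0 (· + 1) else m) = pvStepA := rfl
  rw [e, show (PySem.Dict.mk [(((1 : Int), (2 : Int)), (0 : Int)), ((1, 3), 0), ((1, 4), 0)]) = pvDictOf (0, 0, 0) from rfl]
  rw [pvDict_fold, pvA_fold]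
  simp [pvDictOf, PySem.Dict.items, List.map, pvB_fold]
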